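-- pv_equiv track=rewrite | github.com/PreferredAI/sequentialign | sequentialign.py | get_filtered_data
-- ===== SOURCE A (Python) =====
-- def get_filtered_data(irrel_videos, irrel_slides, s_vlocal, s_clocal, s_relocal, c_vlocal, c_clocal, c_relocal):
--     new_sv, new_sc, new_sr = [], [], {}
--
--     for i in range(len(s_vlocal)):
--         if not i in irrel_slides:
--             new_sr[len(new_sv)] = s_relocal[i]
--             new_sv.append(s_vlocal[i])
--             new_sc.append(s_clocal[i])
--
--     new_cv, new_cc, new_cr = [], [], {}
--
--     for i in range(len(c_vlocal)):
--         if not i in irrel_videos: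
--             new_cr[len(new_cv)] = c_relocal[i]
--             new_cv.append(c_vlocal[i])
--             new_cc.append(c_clocal[i])
--
--     return new_sv, new_sc, new_sr, new_cv, new_cc, new_cr
-- ===== SOURCE B (Python) =====
-- def get_filtered_data(irrel_videos, irrel_slides, s_vlocal, s_clocal, s_relocal, c_vlocal, c_clocal, c_relocal):
--     def side(irrel, v, c, r):
--         trips = list(zip(v, c, r))
--         for p in sorted({x for x in irrel if 0 <= x < len(trips)}, reverse=True):
--             del trips[p]
--         return ([t[0] for t in trips], [t[1] for t in trips],
--                 dict(enumerate(t[2] for t in trips)))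
--     sv, sc, sr = side(irrel_slides, s_vlocal, s_clocal, s_relocal)
--     cv, cc, cr = side(irrel_videos, c_vlocal, c_clocal, c_relocal)
--     return sv, sc, sr, cv, cc, cr
-- ===== Notes on version B (the rewrite author's own statement) =====
-- stated objective: alternative
-- what changed: A scans each side once, testing every index against the irrelevant list and growing three accumulators with the dict keyed by the running length; B instead zips the three lists into one triple list, deletes the distinct in-range irrelevant positions from it largest-first (sort + in-place deletion), and then unzips the surviving triples, numbering the dict by enumerate.
import Mathlib
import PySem

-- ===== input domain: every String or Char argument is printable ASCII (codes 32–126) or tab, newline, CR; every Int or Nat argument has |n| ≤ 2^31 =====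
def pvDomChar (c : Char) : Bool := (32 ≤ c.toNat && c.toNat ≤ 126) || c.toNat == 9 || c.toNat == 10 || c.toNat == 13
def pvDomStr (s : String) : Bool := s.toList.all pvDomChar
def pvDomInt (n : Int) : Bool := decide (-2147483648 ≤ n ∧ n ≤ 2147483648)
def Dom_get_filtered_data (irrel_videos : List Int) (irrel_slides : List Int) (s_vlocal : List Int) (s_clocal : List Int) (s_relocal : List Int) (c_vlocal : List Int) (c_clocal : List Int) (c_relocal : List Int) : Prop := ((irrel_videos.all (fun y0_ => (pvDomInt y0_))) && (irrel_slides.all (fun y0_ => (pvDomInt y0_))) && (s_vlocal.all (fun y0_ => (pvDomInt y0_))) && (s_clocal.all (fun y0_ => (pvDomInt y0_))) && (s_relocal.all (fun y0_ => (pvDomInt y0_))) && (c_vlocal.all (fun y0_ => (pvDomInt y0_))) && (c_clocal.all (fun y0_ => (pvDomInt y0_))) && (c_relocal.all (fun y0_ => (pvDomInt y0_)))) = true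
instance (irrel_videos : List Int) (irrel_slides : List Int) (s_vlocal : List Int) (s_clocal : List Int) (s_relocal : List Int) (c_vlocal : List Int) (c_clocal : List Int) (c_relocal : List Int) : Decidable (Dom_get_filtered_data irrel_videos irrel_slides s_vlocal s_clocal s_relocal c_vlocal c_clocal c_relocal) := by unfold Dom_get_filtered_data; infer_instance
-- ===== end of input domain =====

-- B replaces A's scan-and-keep pass per side (three accumulators, dict keyed by the running
-- length) by zipping the three lists once and DELETING the irrelevant positions from that
-- zipped list, largest first, then unzipping (objective: alternative algorithm, not faster).

-- ===== PORT A =====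
-- one iteration of A's 'for i in range(len(...))' loop body (state = (new_v, new_c, new_r))
def pvStepA (irrel v c r : List Int) (s : List Int × List Int × PySem.Dict Int Int) (i : Int) :
    List Int × List Int × PySem.Dict Int Int :=
  if !(irrel.contains i) then
    (s.1 ++ [PySem.List.pyGetD v i 0], s.2.1 ++ [PySem.List.pyGetD c i 0],
     s.2.2.insert ((s.1.length : Int)) (PySem.List.pyGetD r i 0))
  else s

-- one of A's two identical loops (A's body is this, twice, with different arguments)
def pvSideA (irrel v c r : List Int) : List Int × List Int × PySem.Dict Int Int :=
  (PySem.List.pyRange 0 (v.length : Int) 1).foldl (pvStepA irrel v c r) ([], [], PySem.Dict.empty)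

def get_filtered_data (irrel_videos : List Int) (irrel_slides : List Int) (s_vlocal : List Int) (s_clocal : List Int) (s_relocal : List Int) (c_vlocal : List Int) (c_clocal : List Int) (c_relocal : List Int) : List Int × List Int × (List (Int × Int)) × List Int × List Int × (List (Int × Int)) :=
  let s := pvSideA irrel_slides s_vlocal s_clocal s_relocal
  let c := pvSideA irrel_videos c_vlocal c_clocal c_relocal
  (s.1, s.2.1, s.2.2.items, c.1, c.2.1, c.2.2.items)

-- ===== PORT B =====
-- trips = list(zip(v, c, r))
def pvZip3 (v c r : List Int) : List (Int × Int × Int) := v.zip (c.zip r)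

-- sorted({x for x in irrel if 0 <= x < n}, reverse=True) — exact: sorted of a set without a
-- key does not depend on the set's iteration order
def pvDelPos (irrel : List Int) (n : Int) : List Int :=
  PySem.List.sorted
    (PySem.Set.ofList (irrel.filter (fun x => decide (0 ≤ x) && decide (x < n))))
    (fun x => x) true

-- 'for p in …: del trips[p]'; every p was filtered to 0 ≤ p < len(trips), where
-- 'del trips[p]' is exactly eraseIdx p
def pvDelLoop (ps : List Int) (trips : List (Int × Int × Int)) : List (Int × Int × Int) :=
  ps.foldl (fun l p => l.eraseIdx p.toNat) trips

-- one call of B's helper 'side'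
def pvSideB (irrel v c r : List Int) : List Int × List Int × PySem.Dict Int Int :=
  let trips := pvDelLoop (pvDelPos irrel ((pvZip3 v c r).length : Int)) (pvZip3 v c r)
  (trips.map (fun t => t.1), trips.map (fun t => t.2.1),
   PySem.Dict.ofList (PySem.List.enumerate (trips.map (fun t => t.2.2)) 0))

def get_filtered_data_alt (irrel_videos : List Int) (irrel_slides : List Int) (s_vlocal : List Int) (s_clocal : List Int) (s_relocal : List Int) (c_vlocal : List Int) (c_clocal : List Int) (c_relocal : List Int) : List Int × List Int × (List (Int × Int)) × List Int × List Int × (List (Int × Int)) :=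
  let s := pvSideB irrel_slides s_vlocal s_clocal s_relocal
  let c := pvSideB irrel_videos c_vlocal c_clocal c_relocal
  (s.1, s.2.1, s.2.2.items, c.1, c.2.1, c.2.2.items)

-- ===== PRECONDITION & SPEC =====
-- Pre_ excludes exactly the inputs where Python A raises IndexError: a kept index i of one
-- side's range reaching beyond the corresponding clocal/relocal list.
def Pre_get_filtered_data (irrel_videos : List Int) (irrel_slides : List Int) (s_vlocal : List Int) (s_clocal : List Int) (s_relocal : List Int) (c_vlocal : List Int) (c_clocal : List Int) (c_relocal : List Int) : Prop :=
  (∀ i : Nat, i < s_vlocal.length → ¬ (i : Int) ∈ irrel_slides → i < s_clocal.length ∧ i < s_relocal.length) ∧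
  (∀ i : Nat, i < c_vlocal.length → ¬ (i : Int) ∈ irrel_videos → i < c_clocal.length ∧ i < c_relocal.length)
instance (irrel_videos : List Int) (irrel_slides : List Int) (s_vlocal : List Int) (s_clocal : List Int) (s_relocal : List Int) (c_vlocal : List Int) (c_clocal : List Int) (c_relocal : List Int) : Decidable (Pre_get_filtered_data irrel_videos irrel_slides s_vlocal s_clocal s_relocal c_vlocal c_clocal c_relocal) := by unfold Pre_get_filtered_data; infer_instance

def pvWitness_get_filtered_data : List Int × List Int × List Int × List Int × List Int × List Int × List Int × List Int :=
  ([1], [0], [10, 20], [30, 40], [50, 60], [7], [8], [9])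

def Spec_get_filtered_data (irrel_videos : List Int) (irrel_slides : List Int) (s_vlocal : List Int) (s_clocal : List Int) (s_relocal : List Int) (c_vlocal : List Int) (c_clocal : List Int) (c_relocal : List Int) (out : List Int × List Int × (List (Int × Int)) × List Int × List Int × (List (Int × Int))) : Prop := out = get_filtered_data_alt irrel_videos irrel_slides s_vlocal s_clocal s_relocal c_vlocal c_clocal c_relocal
instance (irrel_videos : List Int) (irrel_slides : List Int) (s_vlocal : List Int) (s_clocal : List Int) (s_relocal : List Int) (c_vlocal : List Int) (c_clocal : List Int) (c_relocal : List Int) (out : List Int × List Int × (List (Int × Int)) × List Int × List Int × (List (Int × Int))) : Decidable (Spec_get_filtered_data irrel_videos irrel_slides s_vlocal s_clocal s_relocal c_vlocal c_clocal c_relocal out) := by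
  unfold Spec_get_filtered_data
  letI h5 : DecidableEq (List Int × (List (Int × Int))) := instDecidableEqProd
  letI h4 : DecidableEq (List Int × List Int × (List (Int × Int))) := instDecidableEqProd
  letI h3 : DecidableEq ((List (Int × Int)) × List Int × List Int × (List (Int × Int))) := instDecidableEqProd
  letI h2 : DecidableEq (List Int × (List (Int × Int)) × List Int × List Int × (List (Int × Int))) := instDecidableEqProd
  letI h1 : DecidableEq (List Int × List Int × (List (Int × Int)) × List Int × List Int × (List (Int × Int))) := instDecidableEqProd
  exact h1 _ _

-- ===== CLAIM (what is proved, stated in full; the proofs are below) =====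
def Claim_equal_get_filtered_data : Prop := ∀ (irrel_videos : List Int) (irrel_slides : List Int) (s_vlocal : List Int) (s_clocal : List Int) (s_relocal : List Int) (c_vlocal : List Int) (c_clocal : List Int) (c_relocal : List Int), Dom_get_filtered_data irrel_videos irrel_slides s_vlocal s_clocal s_relocal c_vlocal c_clocal c_relocal → Pre_get_filtered_data irrel_videos irrel_slides s_vlocal s_clocal s_relocal c_vlocal c_clocal c_relocal → Spec_get_filtered_data irrel_videos irrel_slides s_vlocal s_clocal s_relocal c_vlocal c_clocal c_relocal (get_filtered_data irrel_videos irrel_slides s_vlocal s_clocal s_relocal c_vlocal c_clocal c_relocal)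
-- ===== LEMMAS AND PROOFS =====

-- the list l with the positions in ps (counted from j) removed — what B's deletion loop
-- computes, index by index
def pvKept {α : Type} (ps : List Int) (j : Int) : List α → List α
  | [] => []
  | a :: t => if ps.contains j then pvKept ps (j + 1) t else a :: pvKept ps (j + 1) t

lemma pvKept_of_lt {α : Type} (ps : List Int) (l : List α) : ∀ (j : Int),
    (∀ q ∈ ps, q < j) → pvKept ps j l = l := by
  induction l with
  | nil => intro j _; rfl
  | cons a t ih =>
    intro j h
    have hc : j ∉ ps := fun hj => absurd (h j hj) (lt_irrefl j)
    simp [pvKept, hc, ih (j + 1) (fun q hq => lt_trans (h q hq) (by omega))]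

lemma pvKept_erase {α : Type} (l : List α) : ∀ (j p : Int) (rest : List Int),
    (∀ q ∈ rest, q < p) → j ≤ p → p < j + l.length →
    pvKept rest j (l.eraseIdx (p - j).toNat) = pvKept (p :: rest) j l := by
  induction l with
  | nil => intro j p rest _ _ _; simp [pvKept]
  | cons a t ih =>
    intro j p rest hrest hjp hpl
    by_cases hpj : p = j
    · subst hpj
      have h0 : (p - p).toNat = 0 := by omega
      have hc : (p :: rest).contains p = true := by simp
      rw [h0, List.eraseIdx_cons_zero]
      rw [pvKept_of_lt rest t p hrest]
      show _ = pvKept (p :: rest) p (a :: t)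
      rw [show pvKept (p :: rest) p (a :: t)
            = if (p :: rest).contains p then pvKept (p :: rest) (p + 1) t
              else a :: pvKept (p :: rest) (p + 1) t from rfl, hc]
      simp only [if_true]
      exact (pvKept_of_lt (p :: rest) t (p + 1) (by
        intro q hq
        rcases List.mem_cons.mp hq with h | h
        · omega
        · have := hrest q h; omega)).symm
    · have hjlt : j < p := lt_of_le_of_ne hjp (Ne.symm hpj)
      have hn : (p - j).toNat = (p - (j + 1)).toNat + 1 := by omega
      rw [hn, List.eraseIdx_cons_succ]
      have hcrest : ((p :: rest).contains j) = (rest.contains j) := by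
        simp only [List.contains_cons]
        have : (j == p) = false := by simp [Ne.symm hpj]
        simp [this]
      have hih := ih (j + 1) p rest hrest (by omega) (by
        simp only [List.length_cons] at hpl; push_cast at hpl ⊢; omega)
      show pvKept rest j (a :: t.eraseIdx (p - (j + 1)).toNat) = pvKept (p :: rest) j (a :: t)
      rw [show pvKept rest j (a :: t.eraseIdx (p - (j + 1)).toNat)
            = if rest.contains j then pvKept rest (j + 1) (t.eraseIdx (p - (j + 1)).toNat)
              else a :: pvKept rest (j + 1) (t.eraseIdx (p - (j + 1)).toNat) from rfl]
      rw [show pvKept (p :: rest) j (a :: t)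
            = if (p :: rest).contains j then pvKept (p :: rest) (j + 1) t
              else a :: pvKept (p :: rest) (j + 1) t from rfl]
      rw [hcrest, hih]

lemma pvDelLoop_eq_kept : ∀ (ps : List Int) (l : List (Int × Int × Int)),
    ps.Pairwise (· > ·) → (∀ p ∈ ps, 0 ≤ p ∧ p < (l.length : Int)) →
    pvDelLoop ps l = pvKept ps 0 l := by
  intro ps
  induction ps with
  | nil => intro l _ _; exact (pvKept_of_lt [] l 0 (by simp)).symm
  | cons p rest ih =>
    intro l hpw hb
    have hpb := hb p (List.mem_cons_self)
    have hrest : ∀ q ∈ rest, q < p := fun q hq => (List.pairwise_cons.mp hpw).1 q hq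
    have hlen : (l.eraseIdx p.toNat).length = l.length - 1 := by
      rw [List.length_eraseIdx]
      have : p.toNat < l.length := by omega
      simp [this]
    have hb' : ∀ q ∈ rest, 0 ≤ q ∧ q < ((l.eraseIdx p.toNat).length : Int) := by
      intro q hq
      have := hb q (List.mem_cons_of_mem _ hq)
      have := hrest q hq
      rw [hlen]
      omega
    show (p :: rest).foldl (fun l p => l.eraseIdx p.toNat) l = _
    rw [List.foldl_cons]
    have : rest.foldl (fun l p => l.eraseIdx p.toNat) (l.eraseIdx p.toNat)
        = pvKept rest 0 (l.eraseIdx p.toNat) := ih _ ((List.pairwise_cons.mp hpw).2) hb'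
    rw [this, show p.toNat = (p - 0).toNat by omega]
    exact pvKept_erase l 0 p rest hrest (hpb.1) (by omega)

lemma pvKept_eq_filter_enumerate {α : Type} (ps : List Int) (l : List α) : ∀ (j : Int),
    pvKept ps j l = ((PySem.List.enumerate l j).filter (fun q => !ps.contains q.1)).map (·.2) := by
  induction l with
  | nil => intro j; simp [pvKept, PySem.List.enumerate_nil]
  | cons a t ih =>
    intro j
    rw [PySem.List.enumerate_cons]
    by_cases hc : j ∈ ps
    · simp [pvKept, hc, ih (j + 1)]
    · simp [pvKept, hc, ih (j + 1)]

-- pyGetD on the zipped triple list is the triple of component pyGetDs (indices in range)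
lemma pv_trip_get (v c r : List Int) (i : Int) (h0 : 0 ≤ i)
    (h1 : i < ((pvZip3 v c r).length : Int)) :
    PySem.List.pyGetD (pvZip3 v c r) i ((0 : Int), (0 : Int), (0 : Int))
      = (PySem.List.pyGetD v i 0, PySem.List.pyGetD c i 0, PySem.List.pyGetD r i 0) := by
  have hlen : (pvZip3 v c r).length = min v.length (min c.length r.length) := by
    simp [pvZip3]
  have hv : i < (v.length : Int) := by rw [hlen] at h1; push_cast at h1; omega
  have hc : i < (c.length : Int) := by rw [hlen] at h1; push_cast at h1; omega
  have hr : i < (r.length : Int) := by rw [hlen] at h1; push_cast at h1; omega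
  rw [PySem.List.pyGetD_eq_getElem _ _ h0 h1, PySem.List.pyGetD_eq_getElem _ _ h0 hv,
      PySem.List.pyGetD_eq_getElem _ _ h0 hc, PySem.List.pyGetD_eq_getElem _ _ h0 hr]
  simp [pvZip3, List.getElem_zip]

-- membership in B's deletion-position list
lemma pv_mem_delPos (irrel : List Int) (n : Int) (x : Int) :
    x ∈ pvDelPos irrel n ↔ (x ∈ irrel ∧ 0 ≤ x ∧ x < n) := by
  unfold pvDelPos
  rw [(PySem.List.sorted_perm _ _ _).mem_iff, PySem.Set.mem_ofList, List.mem_filter]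
  simp

-- B's deletion positions are strictly descending
lemma pv_delPos_pairwise (irrel : List Int) (n : Int) :
    (pvDelPos irrel n).Pairwise (· > ·) := by
  unfold pvDelPos
  have hnd : (PySem.List.sorted
      (PySem.Set.ofList (irrel.filter (fun x => decide (0 ≤ x) && decide (x < n))))
      (fun x => x) true).Nodup :=
    (PySem.List.sorted_perm _ _ _).nodup_iff.mpr (PySem.Set.nodup_ofList _)
  have hle := PySem.List.sorted_pairwise_rev
      (PySem.Set.ofList (irrel.filter (fun x => decide (0 ≤ x) && decide (x < n))))
      (fun x : Int => x)
  exact (hle.and hnd).imp (fun h => lt_of_le_of_ne h.1 (Ne.symm h.2))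

-- invariant of A's loop: starting from any state whose dict keys are all below the running
-- length, the loop appends the kept values and appends the dict items with running keys
lemma pv_sideA_loop (irrel v c r : List Int) (L : List Int) (sv sc : List Int)
    (d : PySem.Dict Int Int) (hk : ∀ k ∈ d.keys, k < (sv.length : Int)) :
    L.foldl (pvStepA irrel v c r) (sv, sc, d) =
      (sv ++ (L.filter (fun i => !(irrel.contains i))).map (fun i => PySem.List.pyGetD v i 0),
       sc ++ (L.filter (fun i => !(irrel.contains i))).map (fun i => PySem.List.pyGetD c i 0),
       PySem.Dict.mk (d.items ++ PySem.List.enumerate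
         ((L.filter (fun i => !(irrel.contains i))).map (fun i => PySem.List.pyGetD r i 0))
         (sv.length : Int))) := by
  induction L generalizing sv sc d with
  | nil =>
    simp [PySem.List.enumerate_nil]
  | cons i t ih =>
    rw [List.foldl_cons]
    by_cases h : i ∈ irrel
    · have hb : (!(irrel.contains i)) = false := by simp [h]
      have hstep : pvStepA irrel v c r (sv, sc, d) i = (sv, sc, d) := by
        simp [pvStepA, h]
      rw [hstep, ih sv sc d hk, List.filter_cons, hb]
      simp
    · have hb : (!(irrel.contains i)) = true := by simp [h]
      have hfresh : d.contains ((sv.length : Int)) = false := by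
        rw [PySem.Dict.contains_eq_decide_mem_keys]
        simp only [decide_eq_false_iff_not]
        intro hmem
        exact absurd (hk _ hmem) (lt_irrefl _)
      have hstep : pvStepA irrel v c r (sv, sc, d) i =
          (sv ++ [PySem.List.pyGetD v i 0], sc ++ [PySem.List.pyGetD c i 0],
           d.insert ((sv.length : Int)) (PySem.List.pyGetD r i 0)) := by
        simp [pvStepA, h]
      have hk' : ∀ k ∈ (d.insert ((sv.length : Int)) (PySem.List.pyGetD r i 0)).keys,
          k < (((sv ++ [PySem.List.pyGetD v i 0]).length : Nat) : Int) := by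
        rw [PySem.Dict.keys_insert_of_not_contains d _ hfresh]
        intro k hkm
        rcases List.mem_append.mp hkm with h1 | h2
        · have := hk k h1
          simp only [List.length_append, List.length_cons, List.length_nil]
          push_cast
          omega
        · simp only [List.mem_cons, List.not_mem_nil, or_false] at h2
          subst h2
          simp only [List.length_append, List.length_cons, List.length_nil]
          push_cast
          omega
      rw [hstep, ih _ _ _ hk', List.filter_cons, hb]
      have hlen : ((((sv ++ [PySem.List.pyGetD v i 0]).length : Nat)) : Int)
          = (sv.length : Int) + 1 := by
        simp only [List.length_append, List.length_cons, List.length_nil]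
        push_cast
        ring
      rw [PySem.Dict.items_insert_of_not_contains d _ hfresh, hlen]
      simp only [if_pos, List.map_cons, PySem.List.enumerate_cons, Prod.mk.injEq]
      exact ⟨by simp, by simp, by simp [List.append_assoc]⟩

-- the items of a dict built from enumerate: keys strictly increase, no overwrite happens
lemma pv_dict_enum_items (vals : List Int) :
    (PySem.Dict.ofList (PySem.List.enumerate vals 0)).items = PySem.List.enumerate vals 0 := by
  set l := PySem.List.enumerate vals 0 with hl
  have hofl : PySem.Dict.ofList l
      = l.foldl (fun (d : PySem.Dict Int Int) a => d.insert a.1 a.2) PySem.Dict.empty := rfl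
  have hpair : (l.map Prod.fst).Pairwise (· < ·) := by
    rw [hl, List.pairwise_map]
    exact PySem.List.pairwise_lt_enumerate vals 0
  have hnd : (l.map Prod.fst).Nodup := hpair.imp (fun h => ne_of_lt h)
  have hfr := PySem.Dict.items_foldl_insert_fresh l Prod.fst Prod.snd PySem.Dict.empty
      (fun a _ => PySem.Dict.contains_empty _) hnd
  rw [hofl]
  simpa using hfr

-- one side of the equivalence, under that side's half of Pre_
lemma pv_side_eq (irrel v c r : List Int)
    (hpre : ∀ i : Nat, i < v.length → ¬ (i : Int) ∈ irrel → i < c.length ∧ i < r.length) :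
    pvSideA irrel v c r = pvSideB irrel v c r := by
  have hlen : (pvZip3 v c r).length = min v.length (min c.length r.length) := by
    simp [pvZip3]
  set m : Int := ((pvZip3 v c r).length : Int) with hm
  have hm0 : 0 ≤ m := by positivity
  have hmv : m ≤ (v.length : Int) := by rw [hm, hlen]; push_cast; omega
  -- Step 1: A's kept-index list over range(len v) equals the one over range m
  have hkeep : (PySem.List.pyRange 0 (v.length : Int) 1).filter (fun i => !(irrel.contains i))
      = (PySem.List.pyRange 0 m 1).filter (fun i => !(irrel.contains i)) := by
    rw [show PySem.List.pyRange 0 (v.length : Int) 1 = PySem.List.pyRange 0 (v.length : Int) from rfl,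
        PySem.List.pyRange_one_append 0 m (v.length : Int) hm0 hmv, List.filter_append]
    have htail : (PySem.List.pyRange m (v.length : Int)).filter (fun i => !(irrel.contains i)) = [] := by
      rw [List.filter_eq_nil_iff]
      intro i hi
      have hmem := PySem.List.mem_pyRange_one.mp hi
      simp only [Bool.not_eq_true', Bool.not_eq_false, List.contains_eq_mem, decide_eq_true_eq]
      by_contra hni
      have h0i : 0 ≤ i := le_trans hm0 hmem.1
      have hiv : i.toNat < v.length := by omega
      have hni' : ¬ (i.toNat : Int) ∈ irrel := by
        rw [show (i.toNat : Int) = i by omega]; exact hni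
      have := hpre i.toNat hiv hni'
      have : i < m := by rw [hm, hlen]; push_cast; omega
      omega
    rw [htail, List.append_nil]
  -- Step 2: B's deletion loop computes the map of pyGetD over the kept indices
  have hps := pv_delPos_pairwise irrel m
  have hbnd : ∀ p ∈ pvDelPos irrel m, 0 ≤ p ∧ p < ((pvZip3 v c r).length : Int) := by
    intro p hp
    have := (pv_mem_delPos irrel m p).mp hp
    exact ⟨this.2.1, this.2.2⟩
  have htrips : pvDelLoop (pvDelPos irrel m) (pvZip3 v c r)
      = ((PySem.List.pyRange 0 m 1).filter (fun i => !(irrel.contains i))).map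
          (fun i => PySem.List.pyGetD (pvZip3 v c r) i ((0 : Int), (0 : Int), (0 : Int))) := by
    rw [pvDelLoop_eq_kept _ _ hps hbnd,
        pvKept_eq_filter_enumerate,
        PySem.List.enumerate_eq_map_pyRange (pvZip3 v c r) ((0 : Int), (0 : Int), (0 : Int))]
    rw [show PySem.List.len (pvZip3 v c r) = m from rfl]
    rw [List.filter_map, List.map_map]
    rw [show PySem.List.pyRange 0 m = PySem.List.pyRange 0 m 1 from rfl]
    congr 1
    apply List.filter_congr
    intro x hx
    have hxm := PySem.List.mem_pyRange_one.mp hx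
    show (!(pvDelPos irrel m).contains x) = (!(irrel.contains x))
    have : (pvDelPos irrel m).contains x = irrel.contains x := by
      simp only [List.contains_eq_mem]
      rw [decide_eq_decide]
      rw [pv_mem_delPos]
      constructor
      · exact fun h => h.1
      · exact fun h => ⟨h, hxm.1, hxm.2⟩
    rw [this]
  -- assemble
  set keep := (PySem.List.pyRange 0 m 1).filter (fun i => !(irrel.contains i)) with hkdef
  have hkr : ∀ i ∈ keep, 0 ≤ i ∧ i < m := by
    intro i hi
    have := PySem.List.mem_pyRange_one.mp (List.mem_of_mem_filter hi)
    exact ⟨this.1, this.2⟩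
  have hmapv : keep.map (fun i => (PySem.List.pyGetD (pvZip3 v c r) i ((0:Int),(0:Int),(0:Int))).1)
      = keep.map (fun i => PySem.List.pyGetD v i 0) := by
    apply List.map_congr_left; intro i hi
    rw [pv_trip_get v c r i (hkr i hi).1 (hkr i hi).2]
  have hmapc : keep.map (fun i => (PySem.List.pyGetD (pvZip3 v c r) i ((0:Int),(0:Int),(0:Int))).2.1)
      = keep.map (fun i => PySem.List.pyGetD c i 0) := by
    apply List.map_congr_left; intro i hi
    rw [pv_trip_get v c r i (hkr i hi).1 (hkr i hi).2]
  have hmapr : keep.map (fun i => (PySem.List.pyGetD (pvZip3 v c r) i ((0:Int),(0:Int),(0:Int))).2.2)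
      = keep.map (fun i => PySem.List.pyGetD r i 0) := by
    apply List.map_congr_left; intro i hi
    rw [pv_trip_get v c r i (hkr i hi).1 (hkr i hi).2]
  have hA := pv_sideA_loop irrel v c r (PySem.List.pyRange 0 (v.length : Int) 1) [] []
      PySem.Dict.empty (by intro k hkm; simp [PySem.Dict.keys_empty] at hkm)
  unfold pvSideA pvSideB
  dsimp only
  rw [hA, hkeep, htrips]
  simp only [List.nil_append, List.map_map, Function.comp_def]
  refine congrArg₂ Prod.mk ?_ (congrArg₂ Prod.mk ?_ ?_)
  · exact hmapv.symm
  · exact hmapc.symm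
  · rw [hmapr]
    apply PySem.Dict.ext
    rw [pv_dict_enum_items]
    simp [PySem.Dict.empty]

-- ===== VERDICT (by name: the statement is the Claim_ definition above) =====
theorem get_filtered_data_spec : Claim_equal_get_filtered_data := by
  intro irrel_videos irrel_slides s_vlocal s_clocal s_relocal c_vlocal c_clocal c_relocal _ hpre
  unfold Spec_get_filtered_data get_filtered_data get_filtered_data_alt
  rw [pv_side_eq irrel_slides s_vlocal s_clocal s_relocal hpre.1,
      pv_side_eq irrel_videos c_vlocal c_clocal c_relocal hpre.2]
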